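-- pv_equiv track=rewrite | github.com/marklikesyou/Magi-System | magi/eval/build_adversarial_semantic_suite.py | _category_counts
-- ===== SOURCE A (Python) =====
-- CATEGORIES = (
--     "summary",
--     "extract",
--     "fact_check",
--     "recommend",
--     "decision",
--     "injection",
--     "harmful",
-- )
--
-- def _category_counts(total: int) -> dict[str, int]:
--     if total < len(CATEGORIES):
--         raise ValueError(f"total must be at least {len(CATEGORIES)}")
--     base, remainder = divmod(total, len(CATEGORIES))
--     return {
--         category: base + (1 if index < remainder else 0)
--         for index, category in enumerate(CATEGORIES)
--     }
-- ===== SOURCE B (Python) =====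
-- CATEGORIES = (
--     "summary",
--     "extract",
--     "fact_check",
--     "recommend",
--     "decision",
--     "injection",
--     "harmful",
-- )
--
-- def _category_counts(total: int) -> dict[str, int]:
--     if total < len(CATEGORIES):
--         raise ValueError(f"total must be at least {len(CATEGORIES)}")
--     counts = {}
--     remaining = total
--     bins_left = len(CATEGORIES)
--     for category in CATEGORIES:
--         count = -(-remaining // bins_left)  # ceil division: greedy fair share
--         counts[category] = count
--         remaining -= count
--         bins_left -= 1
--     return counts
-- ===== Notes on version B (the rewrite author's own statement) =====
-- stated objective: alternative
-- what changed: Replaces the single divmod plus index-vs-remainder comparison by a greedy loop that gives each category the ceiling of remaining/bins_left and updates the running remainder.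
import Mathlib
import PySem

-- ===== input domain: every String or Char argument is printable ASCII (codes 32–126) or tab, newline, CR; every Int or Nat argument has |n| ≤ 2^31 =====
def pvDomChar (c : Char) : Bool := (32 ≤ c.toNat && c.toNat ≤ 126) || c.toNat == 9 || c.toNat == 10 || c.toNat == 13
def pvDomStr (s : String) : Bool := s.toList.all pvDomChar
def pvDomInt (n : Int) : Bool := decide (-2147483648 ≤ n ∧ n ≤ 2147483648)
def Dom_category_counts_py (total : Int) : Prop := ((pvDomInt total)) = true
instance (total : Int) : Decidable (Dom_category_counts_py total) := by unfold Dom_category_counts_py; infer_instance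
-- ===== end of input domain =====

-- B replaces divmod+index comparison by a greedy loop taking ceil(remaining/bins_left) per category (alternative decomposition, same cost).
-- ===== PORT A =====
def pvCategories : List String :=
  ["summary", "extract", "fact_check", "recommend", "decision", "injection", "harmful"]

def category_counts_py (total : Int) : List (String × Int) :=
  let base := PySem.Int.floordiv total 7
  let remainder := PySem.Int.mod total 7
  (PySem.List.enumerate pvCategories).map
    (fun p => (p.2, base + (if p.1 < remainder then 1 else 0)))

-- ===== PORT B =====
def pvGreedy : List String → Int → Int → List (String × Int)
  | [], _, _ => []
  | c :: rest, remaining, binsLeft =>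
      let count := -(PySem.Int.floordiv (-remaining) binsLeft)
      (c, count) :: pvGreedy rest (remaining - count) (binsLeft - 1)

def category_counts_py_alt (total : Int) : List (String × Int) :=
  pvGreedy pvCategories total 7

-- ===== PRECONDITION & SPEC =====
-- Pre_ excludes total < 7, where A (and B) raise ValueError("total must be at least 7").
def Pre_category_counts_py (total : Int) : Prop := 7 ≤ total
instance (total : Int) : Decidable (Pre_category_counts_py total) := by unfold Pre_category_counts_py; infer_instance
def pvWitness_category_counts_py : Int := (10)

def Spec_category_counts_py (total : Int) (out : List (String × Int)) : Prop := out = category_counts_py_alt total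
instance (total : Int) (out : List (String × Int)) : Decidable (Spec_category_counts_py total out) := by unfold Spec_category_counts_py; infer_instance

-- ===== CLAIM (what is proved, stated in full; the proofs are below) =====
def Claim_equal_category_counts_py : Prop := ∀ (total : Int), Dom_category_counts_py total → Pre_category_counts_py total → Spec_category_counts_py total (category_counts_py total)

-- ===== LEMMAS AND PROOFS =====

-- every index produced by enumerate is at least the start value
theorem pv_enum_fst_ge {xs : List String} {s : Int} :
    ∀ p ∈ PySem.List.enumerate xs s, s ≤ p.1 := by
  induction xs generalizing s with
  | nil => simp [PySem.List.enumerate_nil]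
  | cons x xs ih =>
      intro p hp
      rw [PySem.List.enumerate_cons] at hp
      rcases List.mem_cons.mp hp with h | h
      · simp [h]
      · have := ih p h; omega

-- closed form of the greedy loop: distributing n*b+m over the n categories of cs
-- (indices starting at s) gives b+1 to the first m and b to the rest.
theorem pv_greedy_eq (cs : List String) :
    ∀ (s b m : Int), 0 ≤ m → m ≤ cs.length →
      pvGreedy cs ((cs.length : Int) * b + m) (cs.length : Int) =
        (PySem.List.enumerate cs s).map
          (fun p => (p.2, b + (if p.1 < s + m then 1 else 0))) := by
  induction cs with
  | nil => intro s b m _ _; simp [pvGreedy, PySem.List.enumerate_nil]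
  | cons c rest ih =>
      intro s b m hm0 hm1
      have hlen : ((c :: rest).length : Int) = (rest.length : Int) + 1 := by
        simp
      have hn : (0 : Int) < ((c :: rest).length : Int) := by
        simp
      rw [PySem.List.enumerate_cons, List.map_cons]
      by_cases hm : 0 < m
      · -- first category gets b + 1
        have hc : -(PySem.Int.floordiv (-(((c :: rest).length : Int) * b + m))
            ((c :: rest).length : Int)) = b + 1 := by
          rw [PySem.Int.neg_floordiv_neg_eq_iff_of_pos hn]
          constructor <;> nlinarith [hm1, hm, hlen]
        rw [pvGreedy, hc]
        have harg : ((c :: rest).length : Int) * b + m - (b + 1)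
            = (rest.length : Int) * b + (m - 1) := by rw [hlen]; ring
        have harg2 : ((c :: rest).length : Int) - 1 = (rest.length : Int) := by omega
        have hm1' : m - 1 ≤ (rest.length : Int) := by
          rw [hlen] at hm1; omega
        rw [harg, harg2, ih (s + 1) b (m - 1) (by omega) hm1']
        refine congrArg₂ List.cons ?_ ?_
        · have h : s < s + m := by omega
          simp [h]
        · apply List.map_congr_left
          intro p _
          have h : s + 1 + (m - 1) = s + m := by ring
          rw [h]
      · -- m = 0 : first category gets b, everyone after gets b too
        have hm' : m = 0 := by omega
        subst hm'
        have hc : -(PySem.Int.floordiv (-(((c :: rest).length : Int) * b + 0))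
            ((c :: rest).length : Int)) = b := by
          rw [PySem.Int.neg_floordiv_neg_eq_iff_of_pos hn]
          constructor <;> nlinarith [hn]
        rw [pvGreedy, hc]
        have harg : ((c :: rest).length : Int) * b + 0 - b
            = (rest.length : Int) * b + 0 := by rw [hlen]; ring
        have harg2 : ((c :: rest).length : Int) - 1 = (rest.length : Int) := by omega
        rw [harg, harg2, ih (s + 1) b 0 le_rfl (Int.natCast_nonneg _)]
        refine congrArg₂ List.cons ?_ ?_
        · simp
        · apply List.map_congr_left
          intro p hp
          have hge := pv_enum_fst_ge p hp
          have h3 : ¬ p.1 ≤ s := by omega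
          have h4 : ¬ p.1 < s := by omega
          simp [h3, h4]

-- ===== VERDICT (by name: the statement is the Claim_ definition above) =====
theorem category_counts_py_spec : Claim_equal_category_counts_py := by
  intro total hdom hpre
  have h7 : (0 : Int) < 7 := by norm_num
  have hb : PySem.Int.floordiv total 7 = total / 7 := PySem.Int.floordiv_eq_ediv_of_pos h7
  have hmo : PySem.Int.mod total 7 = total % 7 := PySem.Int.mod_eq_emod_of_pos h7
  have hlen : ((pvCategories).length : Int) = 7 := by simp [pvCategories]
  have key := pv_greedy_eq pvCategories 0 (total / 7) (total % 7)
      (Int.emod_nonneg total (by norm_num)) (by rw [hlen]; omega)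
  rw [hlen] at key
  rw [show (7 : Int) * (total / 7) + total % 7 = total from by omega] at key
  show category_counts_py total = category_counts_py_alt total
  unfold category_counts_py category_counts_py_alt
  rw [hb, hmo, key]
  apply List.map_congr_left
  intro p _
  have h0 : (0 : Int) + total % 7 = total % 7 := by ring
  rw [h0]
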